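-- pv_equiv track=rewrite | github.com/kyy98/Baekjoon_Python | 프로그래머스/1/42862. 체육복/체육복.py | solution
-- ===== SOURCE A (Python) =====
-- def solution(n, lost, reserve):
--     answer = 0
--     for i in range(1,n+1) :
--         # 도난 당한 학생이다
--         if i in lost :
--             # 그런데 내가 여벌 체육복이 있다
--             if i in reserve :
--                 answer +=1
--             # 내가 여벌 체육복이 없어서 빌려야 한다
--             else :
--                 for j in range(i-1,i+2):
--                     # 인접한 번호의 친구가 갖고 있는데, 얘도 빌려줄 여력이 된다
--                     if j in reserve and j not in lost :
--                         answer += 1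
--                         reserve.remove(j)
--                         break
--
--         # 도난 당하지 않았다
--         else :
--             answer += 1
--
--     return answer
-- ===== SOURCE B (Python) =====
-- def solution(n, lost, reserve):
--     # Two-pointer greedy over sorted lenders; return-value equivalent to A
--     # (A mutates its reserve argument; B does not).
--     lost_set = set(lost)
--     reserve_set = set(reserve)
--     needy = [i for i in range(1, n + 1) if i in lost_set and i not in reserve_set]
--     lenders = sorted(r for r in reserve if r not in lost_set)
--     covered = 0
--     p = 0
--     for i in needy:
--         while p < len(lenders) and lenders[p] < i - 1:
--             p += 1
--         if p < len(lenders) and lenders[p] <= i + 1: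
--             covered += 1
--             p += 1
--     return max(n, 0) - len(needy) + covered
-- ===== Notes on version B (the rewrite author's own statement) =====
-- stated objective: faster
-- what changed: B replaces A's per-student loop with neighbour membership scans and list.remove by a different algorithm: it collects the needy students and the sorted multiset of usable lenders, then runs a single two-pointer sweep of the sorted lenders over the needy list, returning max(n,0) - len(needy) + covered; B does not mutate the reserve argument (return value proved equal).
import Mathlib
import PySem

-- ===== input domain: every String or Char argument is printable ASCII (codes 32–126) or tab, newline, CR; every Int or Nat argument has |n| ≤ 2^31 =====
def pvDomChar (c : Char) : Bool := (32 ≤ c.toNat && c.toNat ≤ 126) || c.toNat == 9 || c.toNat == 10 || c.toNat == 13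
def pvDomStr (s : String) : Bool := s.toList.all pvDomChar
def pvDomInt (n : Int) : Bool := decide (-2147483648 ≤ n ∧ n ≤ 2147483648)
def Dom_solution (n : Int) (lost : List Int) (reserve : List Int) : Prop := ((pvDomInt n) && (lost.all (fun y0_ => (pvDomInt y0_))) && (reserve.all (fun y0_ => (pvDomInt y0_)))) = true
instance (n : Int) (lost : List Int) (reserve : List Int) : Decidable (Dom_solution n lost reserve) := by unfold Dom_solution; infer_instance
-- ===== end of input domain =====

-- B replaces A's per-index scan with neighbour membership tests and list.remove by a
-- two-pointer sweep of the sorted lender multiset over the needy students; only the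
-- RETURN value is compared (A mutates its reserve argument, B does not).

-- ===== PORT A =====
-- inner 'for j in range(i-1,i+2): … break' loop of A
def lendA (lost : List Int) (res : List Int) : List Int → Int × List Int
  | [] => (0, res)
  | j :: js =>
    if j ∈ res ∧ j ∉ lost then (1, (PySem.List.remove? res j).getD res)
    else lendA lost res js

def stepA (lost : List Int) (st : Int × List Int) (i : Int) : Int × List Int :=
  if i ∈ lost then
    if i ∈ st.2 then (st.1 + 1, st.2)
    else
      let r := lendA lost st.2 (PySem.List.pyRange (i - 1) (i + 2) 1)
      (st.1 + r.1, r.2)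
  else (st.1 + 1, st.2)

def solution (n : Int) (lost : List Int) (reserve : List Int) : Int :=
  ((PySem.List.pyRange 1 (n + 1) 1).foldl (stepA lost) (0, reserve)).1

-- ===== PORT B =====
-- 'while p < len(lenders) and lenders[p] < b: p += 1'
def bSkip (lenders : List Int) (b : Int) (p : Nat) : Nat :=
  if h : p < lenders.length then
    if lenders[p] < b then bSkip lenders b (p + 1) else p
  else p
  termination_by lenders.length - p

-- body of 'for i in needy'
def bStep (lenders : List Int) (st : Int × Nat) (i : Int) : Int × Nat :=
  let p := bSkip lenders (i - 1) st.2
  if h : p < lenders.length then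
    if lenders[p] ≤ i + 1 then (st.1 + 1, p + 1) else (st.1, p)
  else (st.1, p)

def solution_alt (n : Int) (lost : List Int) (reserve : List Int) : Int :=
  let lostS := PySem.Set.ofList lost
  let reserveS := PySem.Set.ofList reserve
  let needy := (PySem.List.pyRange 1 (n + 1) 1).filter
    (fun i => decide (i ∈ lostS) && !decide (i ∈ reserveS))
  let lenders := PySem.List.sorted (reserve.filter (fun r => !decide (r ∈ lostS))) (fun x => x) false
  let r := needy.foldl (bStep lenders) (0, 0)
  max n 0 - (needy.length : Int) + r.1

-- ===== PRECONDITION & SPEC =====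
def Spec_solution (n : Int) (lost : List Int) (reserve : List Int) (out : Int) : Prop := out = solution_alt n lost reserve
instance (n : Int) (lost : List Int) (reserve : List Int) (out : Int) : Decidable (Spec_solution n lost reserve out) := by unfold Spec_solution; infer_instance

-- ===== CLAIM (what is proved, stated in full; the proofs are below) =====
def Claim_equal_solution : Prop := ∀ (n : Int) (lost : List Int) (reserve : List Int), Dom_solution n lost reserve → Spec_solution n lost reserve (solution n lost reserve)

-- ===== LEMMAS AND PROOFS =====

-- bSkip never moves the pointer past the end
theorem bSkip_le (lenders : List Int) (b : Int) : ∀ p, p ≤ lenders.length → bSkip lenders b p ≤ lenders.length := by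
  intro p
  induction p using bSkip.induct (lenders := lenders) (b := b) with
  | case1 p h hlt ih => intro _; rw [bSkip, dif_pos h, if_pos hlt]; exact ih h
  | case2 p h hlt => intro _; rw [bSkip, dif_pos h, if_neg hlt]; omega
  | case3 p h => intro hp; rw [bSkip, dif_neg h]; exact hp

-- the suffix at the skipped pointer is dropWhile (< b) of the old suffix
theorem bSkip_drop (lenders : List Int) (b : Int) : ∀ p, lenders.drop (bSkip lenders b p) = (lenders.drop p).dropWhile (fun y => decide (y < b)) := by
  intro p
  induction p using bSkip.induct (lenders := lenders) (b := b) with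
  | case1 p h hlt ih =>
    rw [bSkip, dif_pos h, if_pos hlt, ih, List.drop_eq_getElem_cons h, List.dropWhile_cons]
    simp [hlt]
  | case2 p h hlt =>
    rw [bSkip, dif_pos h, if_neg hlt, List.drop_eq_getElem_cons h, List.dropWhile_cons]
    simp [hlt]
  | case3 p h =>
    rw [bSkip, dif_neg h]
    have hnil : lenders.drop p = [] := List.drop_eq_nil_iff.mpr (by omega)
    simp [hnil]

-- dropping the (< b) prefix does not change counts of values ≥ b
theorem count_dropWhile_ge (l : List Int) (b v : Int) (hv : b ≤ v) :
    (l.dropWhile (fun y => decide (y < b))).count v = l.count v := by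
  conv_rhs => rw [← List.takeWhile_append_dropWhile (p := fun y => decide (y < b)) (l := l)]
  rw [List.count_append]
  have : (l.takeWhile (fun y => decide (y < b))).count v = 0 := by
    rw [List.count_eq_zero]
    intro hv
    have := List.mem_takeWhile_imp hv
    simp at this
    omega
  omega

-- head of dropWhile fails the predicate
theorem head_dropWhile_ge (l : List Int) (b : Int) (h : Int) (t' : List Int) (hd : l.dropWhile (fun y => decide (y < b)) = h :: t') : b ≤ h := by
  have hne : l.dropWhile (fun y => decide (y < b)) ≠ [] := by simp [hd]
  have h2 := List.head_dropWhile_not (fun y => decide (y < b)) hne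
  simp only [hd, List.head_cons] at h2
  simpa using h2

-- the core needy-student step: A's neighbour search and B's pointer move agree
theorem needy_step (lost lenders : List Int)
    (hsl : lenders.Pairwise (· ≤ ·)) (hql : ∀ y ∈ lenders, y ∉ lost)
    (res : List Int) (p : Nat) (x : Int) (a c : Int)
    (hx : x ∈ lost) (hxr : x ∉ res) (hp : p ≤ lenders.length)
    (hcnt : ∀ v, x - 1 ≤ v → (res.filter (fun y => !decide (y ∈ lost))).count v = (lenders.drop p).count v) :
    ∃ (g : Int) (res' : List Int) (p' : Nat),
      stepA lost (a, res) x = (a + g, res') ∧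
      bStep lenders (c, p) x = (c + g, p') ∧
      (∀ j ∈ lost, (j ∈ res' ↔ j ∈ res)) ∧ p' ≤ lenders.length ∧
      (∀ v, x - 1 ≤ v → (res'.filter (fun y => !decide (y ∈ lost))).count v = (lenders.drop p').count v) := by
  have hdrop : lenders.drop (bSkip lenders (x - 1) p)
      = (lenders.drop p).dropWhile (fun y => decide (y < x - 1)) := bSkip_drop lenders (x - 1) p
  have hp'le : bSkip lenders (x - 1) p ≤ lenders.length := bSkip_le lenders (x - 1) p hp
  set q : Int → Bool := fun y => !decide (y ∈ lost) with hqdef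
  set p' : Nat := bSkip lenders (x - 1) p with hp'def
  have hcnt' : ∀ v, x - 1 ≤ v → (res.filter q).count v = (lenders.drop p').count v := by
    intro v hv
    rw [hdrop, count_dropWhile_ge _ _ _ hv]
    exact hcnt v hv
  have hr3 : PySem.List.pyRange (x - 1) (x + 2) 1 = [x - 1, x, x + 1] := by
    rw [PySem.List.pyRange_one_cons (by omega), show x - 1 + 1 = x by ring,
        PySem.List.pyRange_one_cons (by omega), show x + 2 = x + 1 + 1 by ring,
        PySem.List.pyRange_one_singleton]
  have hcond : ∀ j : Int, (j ∈ res ∧ j ∉ lost) ↔ 0 < (res.filter q).count j := by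
    intro j
    rw [List.count_pos_iff, List.mem_filter, hqdef]
    simp
  have hstepA : stepA lost (a, res) x
      = (a + (lendA lost res [x - 1, x, x + 1]).1, (lendA lost res [x - 1, x, x + 1]).2) := by
    rw [stepA, if_pos hx, if_neg hxr, hr3]
  cases hsplit : lenders.drop p' with
  | nil =>
    have hlen : lenders.length ≤ p' := List.drop_eq_nil_iff.mp hsplit
    have hz : ∀ v, x - 1 ≤ v → (res.filter q).count v = 0 := by
      intro v hv; rw [hcnt' v hv, hsplit]; rfl
    have hnc1 : ¬((x - 1) ∈ res ∧ (x - 1) ∉ lost) := by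
      intro hh; have := (hcond _).mp hh; rw [hz _ (by omega)] at this; omega
    have hnc3 : ¬((x + 1) ∈ res ∧ (x + 1) ∉ lost) := by
      intro hh; have := (hcond _).mp hh; rw [hz _ (by omega)] at this; omega
    refine ⟨0, res, p', ?_, ?_, fun j _ => Iff.rfl, hp'le, hcnt'⟩
    · rw [hstepA]; simp [lendA, hnc1, hnc3, hx]
    · rw [bStep]; simp only [← hp'def]
      rw [dif_neg (by omega)]
      norm_num
  | cons h t =>
    have hplt : p' < lenders.length := by
      by_contra hc
      rw [List.drop_eq_nil_iff.mpr (by omega)] at hsplit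
      simp at hsplit
    have hget : lenders[p'] = h ∧ lenders.drop (p' + 1) = t := by
      have := List.drop_eq_getElem_cons hplt
      rw [hsplit] at this
      exact ⟨(List.cons.injEq _ _ _ _ ▸ this).1.symm, ((List.cons.injEq _ _ _ _ ▸ this).2).symm⟩
    have hhge : x - 1 ≤ h := head_dropWhile_ge (lenders.drop p) (x - 1) h t (hdrop ▸ hsplit)
    have hhlend : h ∈ lenders := List.mem_of_mem_drop (hsplit ▸ List.mem_cons_self)
    have hhlost : h ∉ lost := hql h hhlend
    have hhx : h ≠ x := fun he => hhlost (he ▸ hx)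
    have hmin : ∀ y ∈ lenders.drop p', h ≤ y := by
      intro y hy
      rw [hsplit] at hy
      rcases List.mem_cons.mp hy with rfl | hy
      · exact le_refl y
      · exact List.rel_of_pairwise_cons (hsplit ▸ hsl.drop (i := p')) hy
    -- shared erase-count bookkeeping for the two lending cases
    have herase : ∀ w : Int, w ∈ res → w ∉ lost →
        ∀ v, ((res.erase w).filter q).count v + (if v = w then 1 else 0) = (res.filter q).count v := by
      intro w hw hwl v
      have hperm : (res.filter q).Perm ((w :: res.erase w).filter q) :=
        (List.perm_cons_erase hw).filter q
      rw [hperm.count_eq, List.filter_cons_of_pos (by simp [hqdef, hwl]), List.count_cons]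
      by_cases hvw : v = w
      · simp [hvw]
      · simp [hvw]
        omega
    by_cases hc1 : h = x - 1
    · have hcount1 : 0 < (res.filter q).count (x - 1) := by
        rw [hcnt' _ (by omega), hsplit, List.count_cons]
        simp [hc1]
      have hA1 : (x - 1) ∈ res ∧ (x - 1) ∉ lost := (hcond _).mpr hcount1
      refine ⟨1, res.erase (x - 1), p' + 1, ?_, ?_, ?_, by omega, ?_⟩
      · rw [hstepA]
        simp [lendA, hA1, PySem.List.remove?_eq_some_erase res _ hA1.1]
      · rw [bStep]; simp only [← hp'def]
        rw [dif_pos hplt, if_pos (by rw [hget.1, hc1]; omega)]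
      · intro j hj
        have : j ≠ x - 1 := fun he => hA1.2 (he ▸ hj)
        exact List.mem_erase_of_ne this
      · intro v hv
        have h1 := herase (x - 1) hA1.1 hA1.2 v
        have h2 := hcnt' v hv
        rw [hsplit, List.count_cons] at h2
        rw [hget.2]
        have hbv : (h == v) = true ↔ v = x - 1 := by rw [hc1, beq_iff_eq, eq_comm]
        rw [if_congr hbv rfl rfl] at h2
        by_cases hvx : v = x - 1
        · rw [if_pos hvx] at h1 h2; omega
        · rw [if_neg hvx] at h1 h2; omega
    · have hcnt1z : (res.filter q).count (x - 1) = 0 := by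
        rw [hcnt' _ (by omega), List.count_eq_zero]
        intro hm
        exact hc1 (le_antisymm (hmin _ hm) hhge)
      have hnc1 : ¬((x - 1) ∈ res ∧ (x - 1) ∉ lost) := by
        intro hh; have := (hcond _).mp hh; omega
      by_cases hc2 : h = x + 1
      · have hcount3 : 0 < (res.filter q).count (x + 1) := by
          rw [hcnt' _ (by omega), hsplit, List.count_cons]
          simp [hc2]
        have hA3 : (x + 1) ∈ res ∧ (x + 1) ∉ lost := (hcond _).mpr hcount3
        refine ⟨1, res.erase (x + 1), p' + 1, ?_, ?_, ?_, by omega, ?_⟩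
        · rw [hstepA]
          simp [lendA, hnc1, hx, hA3, PySem.List.remove?_eq_some_erase res _ hA3.1]
        · rw [bStep]; simp only [← hp'def]
          rw [dif_pos hplt, if_pos (by rw [hget.1, hc2]) ]
        · intro j hj
          have : j ≠ x + 1 := fun he => hA3.2 (he ▸ hj)
          exact List.mem_erase_of_ne this
        · intro v hv
          have h1 := herase (x + 1) hA3.1 hA3.2 v
          have h2 := hcnt' v hv
          rw [hsplit, List.count_cons] at h2
          rw [hget.2]
          have hbv : (h == v) = true ↔ v = x + 1 := by rw [hc2, beq_iff_eq, eq_comm]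
          rw [if_congr hbv rfl rfl] at h2
          by_cases hvx : v = x + 1
          · rw [if_pos hvx] at h1 h2; omega
          · rw [if_neg hvx] at h1 h2; omega
      · have hh2 : x + 1 < h := by omega
        have hcnt3z : (res.filter q).count (x + 1) = 0 := by
          rw [hcnt' _ (by omega), List.count_eq_zero]
          intro hm
          have := hmin _ hm
          omega
        have hnc3 : ¬((x + 1) ∈ res ∧ (x + 1) ∉ lost) := by
          intro hh; have := (hcond _).mp hh; omega
        refine ⟨0, res, p', ?_, ?_, fun j _ => Iff.rfl, hp'le, hcnt'⟩
        · rw [hstepA]; simp [lendA, hnc1, hnc3, hx]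
        · rw [bStep]; simp only [← hp'def]
          rw [dif_pos hplt, if_neg (by rw [hget.1]; omega)]
          simp

-- joint induction over the index list
theorem main_fold (lost reserve lenders : List Int) (nb : Int → Bool)
    (hsl : lenders.Pairwise (· ≤ ·)) (hql : ∀ y ∈ lenders, y ∉ lost)
    (hnb : ∀ x, nb x = (decide (x ∈ lost) && !decide (x ∈ reserve))) :
    ∀ (L : List Int) (t : Int) (a c : Int) (p : Nat) (res : List Int),
    (∀ x ∈ L, t ≤ x - 1) → L.Pairwise (· < ·) →
    (∀ j ∈ lost, (j ∈ res ↔ j ∈ reserve)) → p ≤ lenders.length →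
    (∀ v, t ≤ v → (res.filter (fun y => !decide (y ∈ lost))).count v = (lenders.drop p).count v) →
    (L.foldl (stepA lost) (a, res)).1 + ((L.filter nb).length : Int) + c
      = a + (L.length : Int) + ((L.filter nb).foldl (bStep lenders) (c, p)).1 := by
  intro L
  induction L with
  | nil => intro t a c p res _ _ _ _ _; simp
  | cons x L ih =>
    intro t a c p res ht hps hI1 hI2 hI3
    have hpt : L.Pairwise (fun a b => a < b) := hps.of_cons
    have hxlt : ∀ y ∈ L, x < y := fun y hy => List.rel_of_pairwise_cons hps hy
    rw [List.foldl_cons, List.filter_cons]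
    by_cases hnx : nb x = true
    · rw [if_pos hnx]
      have hxl : x ∈ lost ∧ x ∉ reserve := by
        have h0 := hnb x; rw [hnx] at h0; symm at h0
        simpa using h0
      have hxres : x ∉ res := fun hm => hxl.2 ((hI1 x hxl.1).mp hm)
      obtain ⟨g, res', p', hA, hB, hI1', hp'le, hcnt'⟩ :=
        needy_step lost lenders hsl hql res p x a c hxl.1 hxres hI2
          (fun v hv => hI3 v (le_trans (ht x List.mem_cons_self) hv))
      rw [hA, List.foldl_cons, hB]
      have ih' := ih (x - 1) (a + g) (c + g) p' res'
        (fun y hy => by have := hxlt y hy; omega) hpt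
        (fun j hj => (hI1' j hj).trans (hI1 j hj)) hp'le hcnt'
      simp only [List.length_cons] at *
      push_cast at *
      omega
    · rw [if_neg hnx]
      have hnx' : nb x = false := by revert hnx; cases nb x <;> simp
      have hstep : stepA lost (a, res) x = (a + 1, res) := by
        by_cases hxl : x ∈ lost
        · have h0 := hnb x; rw [hnx'] at h0
          have hxrv : x ∈ reserve := by
            by_contra hc
            simp [hxl, hc] at h0
          have hxres : x ∈ res := (hI1 x hxl).mpr hxrv
          rw [stepA, if_pos hxl, if_pos hxres]
        · rw [stepA, if_neg hxl]
      rw [hstep]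
      have ih' := ih t (a + 1) c p res (fun y hy => ht y (List.mem_cons_of_mem x hy)) hpt hI1 hI2 hI3
      simp only [List.length_cons] at *
      push_cast at *
      omega

-- ===== VERDICT (by name: the statement is the Claim_ definition above) =====
theorem solution_spec : Claim_equal_solution := by
  unfold Claim_equal_solution
  intro n lost reserve _
  unfold Spec_solution solution solution_alt
  dsimp only
  set nb : Int → Bool := fun i => decide (i ∈ PySem.Set.ofList lost) && !decide (i ∈ PySem.Set.ofList reserve) with hnbdef
  set lenders : List Int := PySem.List.sorted (reserve.filter (fun r => !decide (r ∈ PySem.Set.ofList lost))) (fun x => x) false with hldef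
  have hnb : ∀ x : Int, nb x = (decide (x ∈ lost) && !decide (x ∈ reserve)) := by
    intro x; rw [hnbdef]; simp [PySem.Set.mem_ofList]
  have hsl : lenders.Pairwise (fun a b => a ≤ b) := by
    have := PySem.List.sorted_pairwise (xs := reserve.filter (fun r => !decide (r ∈ PySem.Set.ofList lost))) (key := fun x => x)
    simpa [hldef] using this
  have hql : ∀ y ∈ lenders, y ∉ lost := by
    intro y hy
    rw [hldef, PySem.List.mem_sorted] at hy
    have := (List.mem_filter.mp hy).2
    simpa [PySem.Set.mem_ofList] using this
  have hfeq : reserve.filter (fun r => !decide (r ∈ PySem.Set.ofList lost))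
      = reserve.filter (fun y => !decide (y ∈ lost)) := by
    apply List.filter_congr
    intro x _
    simp [PySem.Set.mem_ofList]
  have hI30 : ∀ v : Int, (0:Int) ≤ v →
      (reserve.filter (fun y => !decide (y ∈ lost))).count v = (lenders.drop 0).count v := by
    intro v _
    rw [List.drop_zero, hldef, (PySem.List.sorted_perm _ _ _).count_eq, hfeq]
  have ht : ∀ x ∈ PySem.List.pyRange 1 (n + 1) 1, (0:Int) ≤ x - 1 := by
    intro x hx
    rw [PySem.List.mem_pyRange_one] at hx
    omega
  have key := main_fold lost reserve lenders nb hsl hql hnb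
    (PySem.List.pyRange 1 (n + 1) 1) 0 0 0 0 reserve ht
    (PySem.List.pairwise_lt_pyRange_one 1 (n + 1)) (fun j _ => Iff.rfl) (Nat.zero_le _) hI30
  have hlen : ((PySem.List.pyRange 1 (n + 1) 1).length : Int) = max n 0 := by
    rw [PySem.List.length_pyRange_one, show n + 1 - 1 = n by ring, Int.toNat_eq_max]
  rw [hlen] at key
  omega
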